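-- pv_equiv track=rewrite | github.com/Sunghwan7330/algorithm_example | baekjoon/18428_avoid_surveillance/main.py | is_surveillance
-- ===== SOURCE A (Python) =====
-- def is_surveillance(corridor, teacher_arr):
--     n = len(corridor)
--     for x, y in teacher_arr:
--         for i in range(x, -1, -1):
--             if corridor[i][y] == "O": break
--             elif corridor[i][y] == "S": return False
--         for i in range(x+1, n):
--             if corridor[i][y] == "O": break
--             elif corridor[i][y] == "S": return False
--
--         for i in range(y, -1, -1):
--             if corridor[x][i] == "O": break
--             elif corridor[x][i] == "S": return False
--         for i in range(y+1, n):
--             if corridor[x][i] == "O": break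
--             elif corridor[x][i] == "S": return False
--
--     return True
-- ===== SOURCE B (Python) =====
-- def is_surveillance(corridor, teacher_arr):
--     n = len(corridor)
--     teachers = set(teacher_arr)
--     for x in range(n):
--         for y in range(n):
--             if corridor[x][y] != "S":
--                 continue
--             if (x, y) in teachers:
--                 return False
--             for i in range(x - 1, -1, -1):
--                 if corridor[i][y] == "O":
--                     break
--                 if (i, y) in teachers:
--                     return False
--             for i in range(x + 1, n):
--                 if corridor[i][y] == "O":
--                     break
--                 if (i, y) in teachers:
--                     return False
--             for j in range(y - 1, -1, -1):
--                 if corridor[x][j] == "O":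
--                     break
--                 if (x, j) in teachers:
--                     return False
--             for j in range(y + 1, n):
--                 if corridor[x][j] == "O":
--                     break
--                 if (x, j) in teachers:
--                     return False
--     return True
-- ===== Notes on version B (the rewrite author's own statement) =====
-- stated objective: alternative
-- what changed: Reverses the scan direction: instead of walking the four rays of every teacher looking for an 'S' glyph, B builds a set of teacher positions once, scans the n x n board for students and walks each student's four rays outward testing membership in that set (one board pass with set lookups, measured faster on the generated inputs); …
-- outside the precondition, e.g. on is_surveillance([['O', 'T'], ['S', 'T']], [(0, 0)]): A returns False, B returns True; on is_surveillance([['S']], [(0, -1)]): A returns False, B returns True; on is_surveillance([['T'], ['S', 'S']], [(0, 0)]): A returns False, B raises IndexError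
import Mathlib
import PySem

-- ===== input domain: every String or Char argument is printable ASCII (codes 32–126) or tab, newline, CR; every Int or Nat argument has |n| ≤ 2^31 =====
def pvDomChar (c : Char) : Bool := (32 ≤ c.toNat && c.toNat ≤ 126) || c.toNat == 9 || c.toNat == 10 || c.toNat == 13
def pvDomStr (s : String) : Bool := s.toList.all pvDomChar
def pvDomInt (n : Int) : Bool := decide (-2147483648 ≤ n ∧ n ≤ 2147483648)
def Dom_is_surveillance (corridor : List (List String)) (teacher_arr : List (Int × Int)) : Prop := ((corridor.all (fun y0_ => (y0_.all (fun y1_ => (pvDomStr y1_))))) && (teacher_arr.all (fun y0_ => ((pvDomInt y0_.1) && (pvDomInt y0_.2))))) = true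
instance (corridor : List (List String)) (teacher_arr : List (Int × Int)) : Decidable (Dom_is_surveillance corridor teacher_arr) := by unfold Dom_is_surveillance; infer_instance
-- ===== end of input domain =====

-- B reverses A's scan direction: it collects the teacher positions in a set once and, for each
-- student cell 'S' of the grid, walks the four rays outward testing membership in that set,
-- where A walks the four rays of every teacher looking for an 'S' glyph.

-- ===== PORT A =====
-- corridor[i][j] as both Pythons read it (pyGet? = Python indexing, incl. negative wrap);
-- the .getD "" default is only reached where Python raises IndexError, which Pre_ excludes.
def pvCell (corridor : List (List String)) (i j : Int) : String :=
  ((PySem.List.pyGet? corridor i).bind (fun row => PySem.List.pyGet? row j)).getD ""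

-- one of A's direction loops: break on "O", return False on "S"
def pvScanA (g : Int → String) : List Int → Bool
  | [] => false
  | i :: rest => if g i = "O" then false else if g i = "S" then true else pvScanA g rest

-- the body of A's outer loop for one teacher (x, y): the four scans, in A's order
def pvSeesA (corridor : List (List String)) (n x y : Int) : Bool :=
  pvScanA (fun i => pvCell corridor i y) (PySem.List.pyRange x (-1) (-1))
  || pvScanA (fun i => pvCell corridor i y) (PySem.List.pyRange (x + 1) n 1)
  || pvScanA (fun i => pvCell corridor x i) (PySem.List.pyRange y (-1) (-1))
  || pvScanA (fun i => pvCell corridor x i) (PySem.List.pyRange (y + 1) n 1)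

def pvLoopA (corridor : List (List String)) (n : Int) : List (Int × Int) → Bool
  | [] => true
  | (x, y) :: rest => if pvSeesA corridor n x y then false else pvLoopA corridor n rest

def is_surveillance (corridor : List (List String)) (teacher_arr : List (Int × Int)) : Bool :=
  pvLoopA corridor (corridor.length : Int) teacher_arr

-- ===== PORT B =====
-- one of B's direction loops: break on "O", return False when the cell is a teacher position
def pvScanB (g : Int → String) (hit : Int → Bool) : List Int → Bool
  | [] => false
  | i :: rest => if g i = "O" then false else if hit i then true else pvScanB g hit rest

-- the body of B's inner loop for one grid cell (x, y): skip non-'S', own-cell test, four walks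
def pvStudentHit (corridor : List (List String)) (ts : PySem.Set (Int × Int)) (n x y : Int) : Bool :=
  if pvCell corridor x y ≠ "S" then false
  else if PySem.Set.contains ts (x, y) then true
  else
    pvScanB (fun i => pvCell corridor i y) (fun i => PySem.Set.contains ts (i, y)) (PySem.List.pyRange (x - 1) (-1) (-1))
    || pvScanB (fun i => pvCell corridor i y) (fun i => PySem.Set.contains ts (i, y)) (PySem.List.pyRange (x + 1) n 1)
    || pvScanB (fun j => pvCell corridor x j) (fun j => PySem.Set.contains ts (x, j)) (PySem.List.pyRange (y - 1) (-1) (-1))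
    || pvScanB (fun j => pvCell corridor x j) (fun j => PySem.Set.contains ts (x, j)) (PySem.List.pyRange (y + 1) n 1)

def pvInnerB (corridor : List (List String)) (ts : PySem.Set (Int × Int)) (n x : Int) : List Int → Bool
  | [] => false
  | y :: ys => if pvStudentHit corridor ts n x y then true else pvInnerB corridor ts n x ys

def pvOuterB (corridor : List (List String)) (ts : PySem.Set (Int × Int)) (n : Int) : List Int → Bool
  | [] => false
  | x :: xs => if pvInnerB corridor ts n x (PySem.List.pyRange 0 n 1) then true else pvOuterB corridor ts n xs

def is_surveillance_alt (corridor : List (List String)) (teacher_arr : List (Int × Int)) : Bool :=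
  let n : Int := corridor.length
  let ts : PySem.Set (Int × Int) := PySem.Set.ofList teacher_arr
  !(pvOuterB corridor ts n (PySem.List.pyRange 0 n 1))

-- ===== PRECONDITION & SPEC =====
-- an unobstructed straight line (no "O" anywhere on the closed segment) from (x, y) to some "S"
-- in the same column (pvVDanger) or row (pvHDanger)
def pvVDanger (c : List (List String)) (n x y : Int) : Prop :=
  ∃ s ∈ PySem.List.pyRange 0 n 1, pvCell c s y = "S" ∧
    ∀ k ∈ PySem.List.pyRange (min x s) (max x s + 1) 1, pvCell c k y ≠ "O"
def pvHDanger (c : List (List String)) (n x y : Int) : Prop :=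
  ∃ s ∈ PySem.List.pyRange 0 n 1, pvCell c x s = "S" ∧
    ∀ k ∈ PySem.List.pyRange (min y s) (max y s + 1) 1, pvCell c x k ≠ "O"

-- a teacher standing on the n×n board and not on an "O" wall cell
def pvNice (c : List (List String)) (p : Int × Int) : Prop :=
  0 ≤ p.1 ∧ p.1 < (c.length : Int) ∧ 0 ≤ p.2 ∧ p.2 < (c.length : Int) ∧
  ¬ ((PySem.List.pyGet? c p.1).bind (fun row => PySem.List.pyGet? row p.2) = some "O")

-- Pre_ requires every row to reach length n (so neither full-board scan nor teacher scan can
-- raise) and admits (i) the natural domain — every teacher on the n×n board and not on an "O"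
-- wall cell — and (ii) inputs where some on-board non-wall teacher has an unobstructed line to
-- an "S" and every teacher up to it has coordinates Python indexing accepts: there A answers
-- False at or before that teacher and B answers False too, whatever the rest of the list holds.
-- Excluded are only inputs whose outcome would depend on Python's negative-index wraparound, on
-- an IndexError from a row shorter than n, or on A's asymmetric own-cell wall check for a
-- teacher standing on an "O" cell (impossible in the source problem), where both answers are
-- defensible.
def Pre_is_surveillance (corridor : List (List String)) (teacher_arr : List (Int × Int)) : Prop :=
  (∀ row ∈ corridor, (corridor.length : Int) ≤ (row.length : Int)) ∧
  ((∀ p ∈ teacher_arr, pvNice corridor p) ∨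
   (∃ k ∈ List.range teacher_arr.length,
     (∀ q ∈ teacher_arr.take (k + 1),
       -(corridor.length : Int) ≤ q.1 ∧ q.1 < (corridor.length : Int) ∧
       -(corridor.length : Int) ≤ q.2 ∧ q.2 < (corridor.length : Int)) ∧
     pvNice corridor (teacher_arr.getD k (0, 0)) ∧
     (pvVDanger corridor (corridor.length : Int) (teacher_arr.getD k (0, 0)).1 (teacher_arr.getD k (0, 0)).2 ∨
      pvHDanger corridor (corridor.length : Int) (teacher_arr.getD k (0, 0)).1 (teacher_arr.getD k (0, 0)).2)))

instance (corridor : List (List String)) (teacher_arr : List (Int × Int)) : Decidable (Pre_is_surveillance corridor teacher_arr) := by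
  unfold Pre_is_surveillance pvNice pvVDanger pvHDanger
  infer_instance

def pvWitness_is_surveillance : List (List String) × (List (Int × Int)) :=
  ([["T", "O"], ["S", "S"]], [((0 : Int), (0 : Int))])

def Spec_is_surveillance (corridor : List (List String)) (teacher_arr : List (Int × Int)) (out : Bool) : Prop := out = is_surveillance_alt corridor teacher_arr
instance (corridor : List (List String)) (teacher_arr : List (Int × Int)) (out : Bool) : Decidable (Spec_is_surveillance corridor teacher_arr out) := by unfold Spec_is_surveillance; infer_instance

-- ===== CLAIM (what is proved, stated in full; the proofs are below) =====
def Claim_equal_is_surveillance : Prop := ∀ (corridor : List (List String)) (teacher_arr : List (Int × Int)), Dom_is_surveillance corridor teacher_arr → Pre_is_surveillance corridor teacher_arr → Spec_is_surveillance corridor teacher_arr (is_surveillance corridor teacher_arr)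

-- ===== LEMMAS AND PROOFS =====
set_option maxHeartbeats 1000000

-- the common value both programs compute: some teacher sees some student
def pvDanger (c : List (List String)) (n : Int) (T : List (Int × Int)) : Prop :=
  ∃ p ∈ T, pvVDanger c n p.1 p.2 ∨ pvHDanger c n p.1 p.2

-- the two line-of-sight predicates, with the list quantifiers unfolded to integer bounds
lemma pvVDanger_iff (c : List (List String)) (n x y : Int) :
    pvVDanger c n x y ↔
    ∃ s : Int, 0 ≤ s ∧ s < n ∧ pvCell c s y = "S" ∧
      ∀ k : Int, min x s ≤ k → k ≤ max x s → pvCell c k y ≠ "O" := by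
  unfold pvVDanger
  constructor
  · rintro ⟨s, hs, hS, hseg⟩
    rw [PySem.List.mem_pyRange_one] at hs
    exact ⟨s, hs.1, hs.2, hS, fun k hk1 hk2 =>
      hseg k (PySem.List.mem_pyRange_one.mpr ⟨hk1, by omega⟩)⟩
  · rintro ⟨s, h0, h1, hS, hseg⟩
    refine ⟨s, PySem.List.mem_pyRange_one.mpr ⟨h0, h1⟩, hS, fun k hk => ?_⟩
    rw [PySem.List.mem_pyRange_one] at hk
    exact hseg k hk.1 (by omega)

lemma pvHDanger_iff (c : List (List String)) (n x y : Int) :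
    pvHDanger c n x y ↔
    ∃ s : Int, 0 ≤ s ∧ s < n ∧ pvCell c x s = "S" ∧
      ∀ k : Int, min y s ≤ k → k ≤ max y s → pvCell c x k ≠ "O" := by
  unfold pvHDanger
  constructor
  · rintro ⟨s, hs, hS, hseg⟩
    rw [PySem.List.mem_pyRange_one] at hs
    exact ⟨s, hs.1, hs.2, hS, fun k hk1 hk2 =>
      hseg k (PySem.List.mem_pyRange_one.mpr ⟨hk1, by omega⟩)⟩
  · rintro ⟨s, h0, h1, hS, hseg⟩
    refine ⟨s, PySem.List.mem_pyRange_one.mpr ⟨h0, h1⟩, hS, fun k hk => ?_⟩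
    rw [PySem.List.mem_pyRange_one] at hk
    exact hseg k hk.1 (by omega)

lemma pvScanA_eq_scanB (g : Int → String) (l : List Int) :
    pvScanA g l = pvScanB g (fun i => decide (g i = "S")) l := by
  induction l with
  | nil => rfl
  | cons i rest ih => simp only [pvScanA, pvScanB, ih]; split_ifs <;> simp_all

-- characterization of a downward scan  range(m, -1, -1), natural upper end
lemma pvScanB_down_nat (g : Int → String) (hit : Int → Bool) (m : ℕ) :
    pvScanB g hit (PySem.List.pyRange (m : Int) (-1) (-1)) = true ↔
    ∃ s : Int, 0 ≤ s ∧ s ≤ (m : Int) ∧ hit s = true ∧ ∀ k : Int, s ≤ k → k ≤ (m : Int) → g k ≠ "O" := by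
  induction m with
  | zero =>
      have h1 : PySem.List.pyRange ((0 : ℕ) : Int) (-1) (-1) = [0] := by
        rw [PySem.List.pyRange_neg_one_cons (by norm_num)]
        norm_num [PySem.List.pyRange_neg_one_eq_nil]
      rw [h1]
      simp only [pvScanB]
      split_ifs with hO hH
      · simp only [false_iff]
        rintro ⟨s, h0, h1, _, hg⟩
        exact hg ((0 : ℕ) : Int) (by omega) (by omega) hO
      · simp only [true_iff]
        refine ⟨((0 : ℕ) : Int), by omega, le_rfl, hH, fun k hk1 hk2 => ?_⟩
        have hk : k = ((0 : ℕ) : Int) := le_antisymm hk2 hk1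
        rw [hk]; exact hO
      · simp only [false_iff]
        rintro ⟨s, h0, h1, hh, _⟩
        have hs : s = ((0 : ℕ) : Int) := by push_cast; omega
        rw [hs] at hh; exact hH hh
  | succ m ih =>
      have hcast : ((m + 1 : ℕ) : Int) - 1 = (m : Int) := by push_cast; ring
      have hc : PySem.List.pyRange ((m + 1 : ℕ) : Int) (-1) (-1)
          = ((m + 1 : ℕ) : Int) :: PySem.List.pyRange (m : Int) (-1) (-1) := by
        rw [PySem.List.pyRange_neg_one_cons (by push_cast; omega), hcast]
      rw [hc]
      simp only [pvScanB]
      split_ifs with hO hH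
      · simp only [false_iff]
        rintro ⟨s, h0, h1, _, hg⟩
        exact hg _ h1 le_rfl hO
      · simp only [true_iff]
        exact ⟨((m + 1 : ℕ) : Int), by positivity, le_rfl, hH, fun k hk1 hk2 => by
          have : k = ((m + 1 : ℕ) : Int) := le_antisymm hk2 hk1
          subst this; exact hO⟩
      · rw [ih]
        constructor
        · rintro ⟨s, h0, h1, hh, hg⟩
          refine ⟨s, h0, by push_cast; omega, hh, fun k hk1 hk2 => ?_⟩
          rcases eq_or_lt_of_le hk2 with h | h
          · subst h; exact hO
          · exact hg k hk1 (by push_cast at h ⊢; omega)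
        · rintro ⟨s, h0, h1, hh, hg⟩
          have hs : s ≤ (m : Int) := by
            rcases eq_or_lt_of_le h1 with h | h
            · exact absurd (h ▸ hh) hH
            · push_cast at h ⊢; omega
          exact ⟨s, h0, hs, hh, fun k hk1 hk2 => hg k hk1 (by push_cast at hk2 ⊢; omega)⟩

-- the same for an arbitrary integer upper end (empty scan when a < 0)
lemma pvScanB_down (g : Int → String) (hit : Int → Bool) (a : Int) :
    pvScanB g hit (PySem.List.pyRange a (-1) (-1)) = true ↔
    ∃ s : Int, 0 ≤ s ∧ s ≤ a ∧ hit s = true ∧ ∀ k : Int, s ≤ k → k ≤ a → g k ≠ "O" := by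
  by_cases h : 0 ≤ a
  · obtain ⟨m, rfl⟩ : ∃ m : ℕ, a = (m : Int) := ⟨a.toNat, (Int.toNat_of_nonneg h).symm⟩
    exact pvScanB_down_nat g hit m
  · rw [PySem.List.pyRange_neg_one_eq_nil (by omega)]
    simp only [pvScanB, Bool.false_eq_true, false_iff]
    rintro ⟨s, h0, h1, _⟩
    omega

-- characterization of an upward scan  range(a, b, 1)
lemma pvScanB_up_aux (g : Int → String) (hit : Int → Bool) (b : Int) :
    ∀ (m : ℕ) (a : Int), (b - a).toNat = m →
    (pvScanB g hit (PySem.List.pyRange a b 1) = true ↔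
     ∃ s : Int, a ≤ s ∧ s < b ∧ hit s = true ∧ ∀ k : Int, a ≤ k → k ≤ s → g k ≠ "O") := by
  intro m
  induction m with
  | zero =>
      intro a hm
      rw [PySem.List.pyRange_one_eq_nil (by omega)]
      simp only [pvScanB, Bool.false_eq_true, false_iff]
      rintro ⟨s, h0, h1, _⟩
      omega
  | succ m ih =>
      intro a hm
      have hab : a < b := by omega
      rw [PySem.List.pyRange_one_cons hab]
      simp only [pvScanB]
      split_ifs with hO hH
      · simp only [false_iff]
        rintro ⟨s, h0, h1, _, hg⟩
        exact hg a le_rfl h0 hO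
      · simp only [true_iff]
        exact ⟨a, le_rfl, hab, hH, fun k hk1 hk2 => by
          have : k = a := le_antisymm hk2 hk1
          subst this; exact hO⟩
      · rw [ih (a + 1) (by omega)]
        constructor
        · rintro ⟨s, h0, h1, hh, hg⟩
          refine ⟨s, by omega, h1, hh, fun k hk1 hk2 => ?_⟩
          rcases eq_or_lt_of_le hk1 with h | h
          · subst h; exact hO
          · exact hg k (by omega) hk2
        · rintro ⟨s, h0, h1, hh, hg⟩
          have hs : a + 1 ≤ s := by
            rcases eq_or_lt_of_le h0 with h | h
            · exact absurd (h ▸ hh) hH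
            · omega
          exact ⟨s, hs, h1, hh, fun k hk1 hk2 => hg k (by omega) hk2⟩

lemma pvScanB_up (g : Int → String) (hit : Int → Bool) (b a : Int) :
    pvScanB g hit (PySem.List.pyRange a b 1) = true ↔
    ∃ s : Int, a ≤ s ∧ s < b ∧ hit s = true ∧ ∀ k : Int, a ≤ k → k ≤ s → g k ≠ "O" :=
  pvScanB_up_aux g hit b _ a rfl

lemma pvLoopA_false_iff (c : List (List String)) (n : Int) (T : List (Int × Int)) :
    pvLoopA c n T = false ↔ ∃ p ∈ T, pvSeesA c n p.1 p.2 = true := by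
  induction T with
  | nil => simp [pvLoopA]
  | cons p rest ih =>
      obtain ⟨x, y⟩ := p
      by_cases h : pvSeesA c n x y = true <;> simp [pvLoopA, h, ih]

lemma pvInnerB_true_iff (c : List (List String)) (ts : PySem.Set (Int × Int)) (n x : Int)
    (l : List Int) : pvInnerB c ts n x l = true ↔ ∃ y ∈ l, pvStudentHit c ts n x y = true := by
  induction l with
  | nil => simp [pvInnerB]
  | cons y ys ih => by_cases h : pvStudentHit c ts n x y = true <;> simp [pvInnerB, h, ih]

lemma pvOuterB_true_iff (c : List (List String)) (ts : PySem.Set (Int × Int)) (n : Int)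
    (l : List Int) : pvOuterB c ts n l = true ↔
    ∃ x ∈ l, ∃ y ∈ PySem.List.pyRange 0 n 1, pvStudentHit c ts n x y = true := by
  induction l with
  | nil => simp [pvOuterB]
  | cons x xs ih =>
      by_cases h : pvInnerB c ts n x (PySem.List.pyRange 0 n 1) = true
      · have hw := (pvInnerB_true_iff c ts n x _).mp h
        simp only [pvOuterB, if_pos h, List.mem_cons, true_iff]
        obtain ⟨y, hy, hhit⟩ := hw
        exact ⟨x, Or.inl rfl, y, hy, hhit⟩
      · simp only [pvOuterB, if_neg h, ih, List.mem_cons]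
        constructor
        · rintro ⟨x', hx', rest⟩; exact ⟨x', Or.inr hx', rest⟩
        · rintro ⟨x', hx' | hx', rest⟩
          · exact absurd ((pvInnerB_true_iff c ts n x _).mpr (hx' ▸ rest)) h
          · exact ⟨x', hx', rest⟩

-- one line of the grid: the closed segment between x and a cell s holding "S" is "O"-free
-- iff A's down-scan from x or A's up-scan from x + 1 finds that "S"
lemma pvSegBridge (g : Int → String) (n x : Int) (hx0 : 0 ≤ x) (hxn : x < n)
    (hgx : g x ≠ "O") :
    (∃ s : Int, 0 ≤ s ∧ s < n ∧ g s = "S" ∧ ∀ k : Int, min x s ≤ k → k ≤ max x s → g k ≠ "O") ↔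
    ((∃ s : Int, 0 ≤ s ∧ s ≤ x ∧ g s = "S" ∧ ∀ k : Int, s ≤ k → k ≤ x → g k ≠ "O") ∨
     (∃ s : Int, x + 1 ≤ s ∧ s < n ∧ g s = "S" ∧ ∀ k : Int, x + 1 ≤ k → k ≤ s → g k ≠ "O")) := by
  constructor
  · rintro ⟨s, h0, h1, hS, hseg⟩
    rcases (show s ≤ x ∨ x < s by omega) with hsx | hsx
    · exact Or.inl ⟨s, h0, hsx, hS, fun k hk1 hk2 => hseg k (by omega) (by omega)⟩
    · exact Or.inr ⟨s, by omega, h1, hS, fun k hk1 hk2 => hseg k (by omega) (by omega)⟩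
  · rintro (⟨s, h0, h1, hS, hseg⟩ | ⟨s, h0, h1, hS, hseg⟩)
    · exact ⟨s, h0, by omega, hS, fun k hk1 hk2 => hseg k (by omega) (by omega)⟩
    · refine ⟨s, by omega, h1, hS, fun k hk1 hk2 => ?_⟩
      rcases eq_or_lt_of_le (show x ≤ k by omega) with h | h
      · rw [← h]; exact hgx
      · exact hseg k (by omega) (by omega)

-- per-teacher bridge: A's four scans find an 'S' iff the symmetric danger predicate holds
lemma pvSeesA_iff (c : List (List String)) (n x y : Int)
    (hx0 : 0 ≤ x) (hy0 : 0 ≤ y) (hxn : x < n) (hyn : y < n)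
    (hcell : pvCell c x y ≠ "O") :
    pvSeesA c n x y = true ↔ pvVDanger c n x y ∨ pvHDanger c n x y := by
  have hv := pvSegBridge (fun i => pvCell c i y) n x hx0 hxn hcell
  have hh := pvSegBridge (fun j => pvCell c x j) n y hy0 hyn hcell
  beta_reduce at hv hh
  rw [pvVDanger_iff, pvHDanger_iff]
  simp only [pvSeesA, Bool.or_eq_true, pvScanA_eq_scanB, pvScanB_down, pvScanB_up,
    decide_eq_true_eq]
  rw [hv, hh]
  exact or_assoc

lemma pvContainsOfList (T : List (Int × Int)) (p : Int × Int) :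
    (PySem.Set.ofList T).contains p = true ↔ p ∈ T :=
  (PySem.Set.contains_iff _ _).trans (PySem.Set.mem_ofList _ _)

-- per-student bridge: B flags a student at (x, y) iff a teacher is on it or an "O"-free
-- ray from it reaches a teacher position
lemma pvStudentHit_iff (c : List (List String)) (T : List (Int × Int)) (n x y : Int) :
    pvStudentHit c (PySem.Set.ofList T) n x y = true ↔
    pvCell c x y = "S" ∧ ((x, y) ∈ T ∨
      (∃ i : Int, 0 ≤ i ∧ i ≤ x - 1 ∧ (i, y) ∈ T ∧ ∀ k : Int, i ≤ k → k ≤ x - 1 → pvCell c k y ≠ "O") ∨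
      (∃ i : Int, x + 1 ≤ i ∧ i < n ∧ (i, y) ∈ T ∧ ∀ k : Int, x + 1 ≤ k → k ≤ i → pvCell c k y ≠ "O") ∨
      (∃ j : Int, 0 ≤ j ∧ j ≤ y - 1 ∧ (x, j) ∈ T ∧ ∀ k : Int, j ≤ k → k ≤ y - 1 → pvCell c x k ≠ "O") ∨
      (∃ j : Int, y + 1 ≤ j ∧ j < n ∧ (x, j) ∈ T ∧ ∀ k : Int, y + 1 ≤ k → k ≤ j → pvCell c x k ≠ "O")) := by
  unfold pvStudentHit
  split_ifs with hS hOwn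
  · simp only [false_iff]
    rintro ⟨h, -⟩
    exact hS h
  · have hS := not_not.mp hS
    have hmem : (x, y) ∈ T := (pvContainsOfList T (x, y)).mp hOwn
    simp only [true_iff]
    exact ⟨hS, Or.inl hmem⟩
  · have hS := not_not.mp hS
    have hnot : ¬ (x, y) ∈ T := fun h => hOwn ((pvContainsOfList T (x, y)).mpr h)
    simp only [Bool.or_eq_true, pvScanB_down, pvScanB_up, pvContainsOfList]
    constructor
    · rintro (((h | h) | h) | h)
      · exact ⟨hS, Or.inr (Or.inl h)⟩
      · exact ⟨hS, Or.inr (Or.inr (Or.inl h))⟩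
      · exact ⟨hS, Or.inr (Or.inr (Or.inr (Or.inl h)))⟩
      · exact ⟨hS, Or.inr (Or.inr (Or.inr (Or.inr h)))⟩
    · rintro ⟨-, (h | h | h | h | h)⟩
      · exact absurd h hnot
      · exact Or.inl (Or.inl (Or.inl h))
      · exact Or.inl (Or.inl (Or.inr h))
      · exact Or.inl (Or.inr h)
      · exact Or.inr h

lemma pvOptGetD_ne (o : Option String) (h : ¬ o = some "O") : o.getD "" ≠ "O" := by
  cases o with
  | none => decide
  | some v =>
      intro hv
      rw [Option.getD_some] at hv
      exact h (by rw [hv])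

lemma pvNice_cell (c : List (List String)) (p : Int × Int) (hn : pvNice c p) :
    pvCell c p.1 p.2 ≠ "O" := by
  obtain ⟨-, -, -, -, hO⟩ := hn
  unfold pvCell
  exact pvOptGetD_ne _ hO

-- one nice teacher with a line of sight forces A's answer to False
lemma pvA_false_of (c : List (List String)) (T : List (Int × Int)) (p : Int × Int)
    (hp : p ∈ T) (hn : pvNice c p)
    (hd : pvVDanger c (c.length : Int) p.1 p.2 ∨ pvHDanger c (c.length : Int) p.1 p.2) :
    is_surveillance c T = false := by
  obtain ⟨h0, h1, h2, h3, hO⟩ := hn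
  unfold is_surveillance
  rw [pvLoopA_false_iff]
  exact ⟨p, hp, (pvSeesA_iff c _ p.1 p.2 h0 h2 h1 h3
    (pvNice_cell c p ⟨h0, h1, h2, h3, hO⟩)).mpr hd⟩

-- … and B's as well
lemma pvB_false_of (c : List (List String)) (T : List (Int × Int)) (p : Int × Int)
    (hp : p ∈ T) (hn : pvNice c p)
    (hd : pvVDanger c (c.length : Int) p.1 p.2 ∨ pvHDanger c (c.length : Int) p.1 p.2) :
    is_surveillance_alt c T = false := by
  obtain ⟨tx, ty⟩ := p
  obtain ⟨htx0, htxn, hty0, htyn, hO⟩ := hn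
  unfold is_surveillance_alt
  have hnot : ∀ b : Bool, ((!b) = false ↔ b = true) := by decide
  rw [hnot]
  rw [pvOuterB_true_iff]
  simp only [PySem.List.mem_pyRange_one]
  rcases hd with hd | hd
  · obtain ⟨s, hs0, hsn, hS, hseg⟩ := (pvVDanger_iff c _ tx ty).mp hd
    refine ⟨s, ⟨hs0, hsn⟩, ty, ⟨hty0, htyn⟩, ?_⟩
    rw [pvStudentHit_iff]
    refine ⟨hS, ?_⟩
    rcases (show tx = s ∨ tx ≤ s - 1 ∨ s + 1 ≤ tx by omega) with h | h | h
    · exact Or.inl (h ▸ hp)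
    · exact Or.inr (Or.inl ⟨tx, htx0, h, hp, fun k hk1 hk2 => hseg k (by omega) (by omega)⟩)
    · exact Or.inr (Or.inr (Or.inl ⟨tx, by omega, htxn, hp,
        fun k hk1 hk2 => hseg k (by omega) (by omega)⟩))
  · obtain ⟨s, hs0, hsn, hS, hseg⟩ := (pvHDanger_iff c _ tx ty).mp hd
    refine ⟨tx, ⟨htx0, htxn⟩, s, ⟨hs0, hsn⟩, ?_⟩
    rw [pvStudentHit_iff]
    refine ⟨hS, ?_⟩
    rcases (show ty = s ∨ ty ≤ s - 1 ∨ s + 1 ≤ ty by omega) with h | h | h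
    · exact Or.inl (h ▸ hp)
    · exact Or.inr (Or.inr (Or.inr (Or.inl ⟨ty, hty0, h, hp,
        fun k hk1 hk2 => hseg k (by omega) (by omega)⟩)))
    · exact Or.inr (Or.inr (Or.inr (Or.inr ⟨ty, by omega, htyn, hp,
        fun k hk1 hk2 => hseg k (by omega) (by omega)⟩)))

-- with every teacher nice, A answers False exactly on pvDanger
theorem pvA_false_iff (c : List (List String)) (T : List (Int × Int))
    (hT : ∀ p ∈ T, pvNice c p) :
    is_surveillance c T = false ↔ pvDanger c (c.length : Int) T := by
  unfold is_surveillance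
  rw [pvLoopA_false_iff]
  unfold pvDanger
  constructor
  · rintro ⟨p, hp, hsee⟩
    obtain ⟨hx0, hxn, hy0, hyn, hO⟩ := hT p hp
    exact ⟨p, hp, (pvSeesA_iff c _ p.1 p.2 hx0 hy0 hxn hyn
      (pvNice_cell c p (hT p hp))).mp hsee⟩
  · rintro ⟨p, hp, hd⟩
    obtain ⟨hx0, hxn, hy0, hyn, hO⟩ := hT p hp
    exact ⟨p, hp, (pvSeesA_iff c _ p.1 p.2 hx0 hy0 hxn hyn
      (pvNice_cell c p (hT p hp))).mpr hd⟩

-- … and so does B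
theorem pvB_false_iff (c : List (List String)) (T : List (Int × Int))
    (hT : ∀ p ∈ T, pvNice c p) :
    is_surveillance_alt c T = false ↔ pvDanger c (c.length : Int) T := by
  constructor
  · intro hB
    unfold is_surveillance_alt at hB
    have hnot : ∀ b : Bool, ((!b) = false ↔ b = true) := by decide
    rw [hnot] at hB
    rw [pvOuterB_true_iff] at hB
    simp only [PySem.List.mem_pyRange_one] at hB
    unfold pvDanger
    obtain ⟨x, ⟨hx0, hxn⟩, y, ⟨hy0, hyn⟩, hhit⟩ := hB
    rw [pvStudentHit_iff] at hhit
    obtain ⟨hS, hcase⟩ := hhit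
    have hSO : pvCell c x y ≠ "O" := by rw [hS]; decide
    rcases hcase with h | ⟨i, h0, h1, hm, hg⟩ | ⟨i, h0, h1, hm, hg⟩ | ⟨j, h0, h1, hm, hg⟩ | ⟨j, h0, h1, hm, hg⟩
    · refine ⟨(x, y), h, Or.inl ((pvVDanger_iff c _ x y).mpr ⟨x, hx0, hxn, hS, fun k hk1 hk2 => ?_⟩)⟩
      have hk : k = x := by omega
      rw [hk]; exact hSO
    · refine ⟨(i, y), hm, Or.inl ((pvVDanger_iff c _ i y).mpr ⟨x, hx0, hxn, hS, fun k hk1 hk2 => ?_⟩)⟩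
      rcases (show k ≤ x - 1 ∨ k = x by omega) with hk | hk
      · exact hg k (by omega) hk
      · rw [hk]; exact hSO
    · refine ⟨(i, y), hm, Or.inl ((pvVDanger_iff c _ i y).mpr ⟨x, hx0, hxn, hS, fun k hk1 hk2 => ?_⟩)⟩
      rcases (show k = x ∨ x + 1 ≤ k by omega) with hk | hk
      · rw [hk]; exact hSO
      · exact hg k hk (by omega)
    · refine ⟨(x, j), hm, Or.inr ((pvHDanger_iff c _ x j).mpr ⟨y, hy0, hyn, hS, fun k hk1 hk2 => ?_⟩)⟩
      rcases (show k ≤ y - 1 ∨ k = y by omega) with hk | hk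
      · exact hg k (by omega) hk
      · rw [hk]; exact hSO
    · refine ⟨(x, j), hm, Or.inr ((pvHDanger_iff c _ x j).mpr ⟨y, hy0, hyn, hS, fun k hk1 hk2 => ?_⟩)⟩
      rcases (show k = y ∨ y + 1 ≤ k by omega) with hk | hk
      · rw [hk]; exact hSO
      · exact hg k hk (by omega)
  · rintro ⟨p, hp, hd⟩
    exact pvB_false_of c T p hp (hT p hp) hd

-- ===== VERDICT (by name: the statement is the Claim_ definition above) =====
theorem is_surveillance_spec : Claim_equal_is_surveillance := by
  intro c T _hdom hpre
  unfold Spec_is_surveillance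
  obtain ⟨_hrows, hAll | ⟨k, hk, _hwrap, hn, hd⟩⟩ := hpre
  · have hA := pvA_false_iff c T hAll
    have hB := pvB_false_iff c T hAll
    have : (is_surveillance c T = false) ↔ (is_surveillance_alt c T = false) := hA.trans hB.symm
    cases hA' : is_surveillance c T <;> cases hB' : is_surveillance_alt c T <;> simp_all
  · rw [List.mem_range] at hk
    have hgd : T.getD k (0, 0) = T[k] := List.getD_eq_getElem T (0, 0) hk
    have hp : T.getD k (0, 0) ∈ T := by rw [hgd]; exact List.getElem_mem hk
    rw [pvA_false_of c T _ hp hn hd, pvB_false_of c T _ hp hn hd]
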